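-- pv_equiv track=rewrite | github.com/dyu056/textbook_spiderman | validate_har_data.py | check_for_placeholders
-- ===== SOURCE A (Python) =====
-- PLACEHOLDER_MARKERS = [
--     'lorem ipsum',
--     'consectetur adipiscing',
--     'pellentesque dapibus',
--     'facilisis',
--     'laoreet',
--     'donec aliquet',
--     'ultrices ac magna',
--     'lorem',
-- ]
--
-- def check_for_placeholders(text):
--     """检查文本中是否包含占位符"""
--     if not text:
--         return False
--     text_lower = text.lower()
--     for marker in PLACEHOLDER_MARKERS:
--         if marker in text_lower:
--             return True
--     return False
-- ===== SOURCE B (Python) =====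
-- PLACEHOLDER_MARKERS = [
--     'lorem ipsum',
--     'consectetur adipiscing',
--     'pellentesque dapibus',
--     'facilisis',
--     'laoreet',
--     'donec aliquet',
--     'ultrices ac magna',
--     'lorem',
-- ]
--
-- # First-character dispatch index: marker candidates grouped by their first letter,
-- # so the scan consults only markers that could possibly start at each position.
-- _INDEX = {}
-- for _m in PLACEHOLDER_MARKERS:
--     _INDEX.setdefault(_m[0], []).append(_m)
--
-- def check_for_placeholders(text):
--     t = (text or "").lower()
--     for i, ch in enumerate(t):
--         for m in _INDEX.get(ch, ()):
--             if t.startswith(m, i):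
--                 return True
--     return False
-- ===== Notes on version B (the rewrite author's own statement) =====
-- stated objective: alternative
-- what changed: B builds a dict index of the markers keyed by their first character once, then makes a single left-to-right pass over the lowered text testing only the first-char-matching candidates at each position, instead of A's eight independent whole-text substring scans.
import Mathlib
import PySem

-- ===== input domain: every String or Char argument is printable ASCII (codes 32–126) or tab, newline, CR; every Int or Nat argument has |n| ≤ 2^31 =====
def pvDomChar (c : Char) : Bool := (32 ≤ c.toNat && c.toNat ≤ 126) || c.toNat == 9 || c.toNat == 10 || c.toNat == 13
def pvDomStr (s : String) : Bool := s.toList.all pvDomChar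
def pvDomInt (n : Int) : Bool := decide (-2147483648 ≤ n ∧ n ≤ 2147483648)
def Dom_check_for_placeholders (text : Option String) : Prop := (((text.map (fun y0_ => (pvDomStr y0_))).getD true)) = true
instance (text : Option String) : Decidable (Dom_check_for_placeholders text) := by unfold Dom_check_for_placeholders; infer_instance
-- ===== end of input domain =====

-- B groups the markers in a dict keyed by first character and makes one pass over the
-- lowered text, testing only the first-char-matching candidates at each position
-- (alternative decomposition; not claimed faster).

-- ===== PORT A =====
def PLACEHOLDER_MARKERS : List String :=
  ["lorem ipsum", "consectetur adipiscing", "pellentesque dapibus", "facilisis",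
   "laoreet", "donec aliquet", "ultrices ac magna", "lorem"]

-- A's for-loop with early return over the marker list
def loopA (tl : String) : List String → Bool
  | [] => false
  | m :: rest => if PySem.Str.isIn m tl then true else loopA tl rest

def check_for_placeholders (text : Option String) : Bool :=
  match text with
  | none => false
  | some s =>
    if s = "" then false
    else loopA (PySem.Str.lower s) PLACEHOLDER_MARKERS

-- ===== PORT B =====
-- module-level _INDEX: markers grouped by first character via setdefault/append
def markerIndex : PySem.Dict Char (List String) :=
  PLACEHOLDER_MARKERS.foldl
    (fun d m =>
      match m.toList with
      | [] => d
      | c :: _ => d.insert c (d.getD c [] ++ [m]))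
    PySem.Dict.empty

-- the enumerate loop: at each position, try only the candidates indexed under that char
def scanIdx : List Char → Bool
  | [] => false
  | c :: rest =>
    if (markerIndex.getD c []).any (fun m => PySem.Chars.startswith (c :: rest) m.toList)
    then true else scanIdx rest

def check_for_placeholders_alt (text : Option String) : Bool :=
  scanIdx (PySem.Str.lower (text.getD "")).toList

-- ===== PRECONDITION & SPEC =====
def Spec_check_for_placeholders (text : Option String) (out : Bool) : Prop := out = check_for_placeholders_alt text
instance (text : Option String) (out : Bool) : Decidable (Spec_check_for_placeholders text out) := by unfold Spec_check_for_placeholders; infer_instance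

-- ===== CLAIM =====
def Claim_equal_check_for_placeholders : Prop := ∀ (text : Option String), Dom_check_for_placeholders text → Spec_check_for_placeholders text (check_for_placeholders text)

-- ===== LEMMAS AND PROOFS =====

theorem loopA_iff (tl : String) (ms : List String) :
    loopA tl ms = true ↔ ∃ m ∈ ms, m.toList <:+: tl.toList := by
  induction ms with
  | nil => simp [loopA]
  | cons m rest ih =>
    simp only [loopA]
    split_ifs with h
    · simp only [true_iff]
      exact ⟨m, List.mem_cons_self .., (PySem.Str.isIn_iff_infix ..).mp h⟩
    · rw [ih]
      constructor
      · rintro ⟨x, hx, hinf⟩; exact ⟨x, List.mem_cons_of_mem _ hx, hinf⟩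
      · rintro ⟨x, hx, hinf⟩
        rcases List.mem_cons.mp hx with rfl | hx
        · exact absurd ((PySem.Str.isIn_iff_infix ..).mpr hinf) (by simpa using h)
        · exact ⟨x, hx, hinf⟩

-- the concrete index built by the fold
theorem markerIndex_eq : markerIndex = PySem.Dict.mk
    [('l', ["lorem ipsum", "laoreet", "lorem"]),
     ('c', ["consectetur adipiscing"]),
     ('p', ["pellentesque dapibus"]),
     ('f', ["facilisis"]),
     ('d', ["donec aliquet"]),
     ('u', ["ultrices ac magna"])] := by decide

theorem getD_markerIndex (c : Char) : markerIndex.getD c [] =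
    if 'l' = c then ["lorem ipsum", "laoreet", "lorem"]
    else if 'c' = c then ["consectetur adipiscing"]
    else if 'p' = c then ["pellentesque dapibus"]
    else if 'f' = c then ["facilisis"]
    else if 'd' = c then ["donec aliquet"]
    else if 'u' = c then ["ultrices ac magna"]
    else [] := by
  rw [markerIndex_eq, PySem.Dict.getD_eq_get?_getD]
  simp only [PySem.Dict.get?_mk_cons, beq_iff_eq]
  split_ifs <;> rfl

-- the inner candidate test is equivalent to testing every marker as a prefix here
theorem candidates_iff (c : Char) (rest : List Char) :
    ((markerIndex.getD c []).any (fun m => PySem.Chars.startswith (c :: rest) m.toList) = true)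
    ↔ ∃ m ∈ PLACEHOLDER_MARKERS, m.toList <+: c :: rest := by
  rw [List.any_eq_true]
  constructor
  · rintro ⟨m, hm, hsw⟩
    have hpre := (PySem.Chars.startswith_iff ..).mp hsw
    refine ⟨m, ?_, hpre⟩
    rw [getD_markerIndex] at hm
    split_ifs at hm <;> (try fin_cases hm) <;> decide
  · rintro ⟨m, hm, hpre⟩
    -- the marker's first char equals c, so it sits in the index bucket for c
    have hc : m.toList.head? = some c := by
      obtain ⟨t, ht⟩ := hpre
      have hne : m.toList ≠ [] := by fin_cases hm <;> decide
      cases hml : m.toList with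
      | nil => exact absurd hml hne
      | cons a l =>
        rw [hml] at ht
        simp only [List.cons_append] at ht
        exact congrArg some (List.cons.injEq .. ▸ ht).1
    refine ⟨m, ?_, (PySem.Chars.startswith_iff ..).mpr hpre⟩
    fin_cases hm <;> (injection hc with hc2; subst hc2; decide)

theorem scanIdx_iff (cs : List Char) :
    scanIdx cs = true ↔ ∃ m ∈ PLACEHOLDER_MARKERS, m.toList <:+: cs := by
  induction cs with
  | nil =>
    simp only [scanIdx, Bool.false_eq_true, false_iff]
    rintro ⟨m, hm, hinf⟩
    have : m.toList ≠ [] := by fin_cases hm <;> decide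
    exact this (List.infix_nil.mp hinf)
  | cons c rest ih =>
    simp only [scanIdx]
    split_ifs with h
    · simp only [true_iff]
      obtain ⟨m, hm, hpre⟩ := (candidates_iff c rest).mp h
      exact ⟨m, hm, hpre.isInfix⟩
    · rw [ih]
      constructor
      · rintro ⟨m, hm, hinf⟩; exact ⟨m, hm, hinf.trans (List.suffix_cons c rest).isInfix⟩
      · rintro ⟨m, hm, hinf⟩
        rcases List.infix_cons_iff.mp hinf with hpre | hsuf
        · exact absurd ((candidates_iff c rest).mpr ⟨m, hm, hpre⟩) h
        · exact ⟨m, hm, hsuf⟩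

-- ===== VERDICT =====
theorem check_for_placeholders_spec : Claim_equal_check_for_placeholders := by
  intro text _
  unfold Spec_check_for_placeholders check_for_placeholders check_for_placeholders_alt
  match text with
  | none => rfl
  | some s =>
    simp only [Option.getD_some]
    split_ifs with h
    · subst h; rfl
    · rw [Bool.eq_iff_iff, loopA_iff, scanIdx_iff]
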